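-- pv_equiv track=rewrite | github.com/gcnTo/Code-Chef-DSA | recursive_stupmach_but_too_much_memory.py | adder
-- ===== SOURCE A (Python) =====
-- def adder(box, total, initial_minimum):
--     if len(box) == 1:
--         return total + box[0] - initial_minimum
--     else:
--         smallest = min(box)
--         pos = box.index(smallest)
--         total += smallest * len(box)
--         return adder(box[:pos],total, initial_minimum)
-- ===== SOURCE B (Python) =====
-- def adder(box, total, initial_minimum):
--     # One left-to-right pass over the strict prefix-minimum records instead of
--     # repeated min/index/slice recursion.
--     acc = total + box[0] - initial_minimum
--     prev = 0
--     cur_min = box[0]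
--     for i in range(1, len(box)):
--         if box[i] < cur_min:
--             if prev >= 1:
--                 acc += box[prev] * i
--             cur_min = box[i]
--             prev = i
--     if prev >= 1:
--         acc += box[prev] * len(box)
--     return acc
-- ===== Notes on version B (the rewrite author's own statement) =====
-- stated objective: faster
-- what changed: Replaced the O(n^2) recursion (min + index + slice at each level) by a single left-to-right pass that tracks strict prefix-minimum record positions and adds each record value times the next record's index.
import Mathlib
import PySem

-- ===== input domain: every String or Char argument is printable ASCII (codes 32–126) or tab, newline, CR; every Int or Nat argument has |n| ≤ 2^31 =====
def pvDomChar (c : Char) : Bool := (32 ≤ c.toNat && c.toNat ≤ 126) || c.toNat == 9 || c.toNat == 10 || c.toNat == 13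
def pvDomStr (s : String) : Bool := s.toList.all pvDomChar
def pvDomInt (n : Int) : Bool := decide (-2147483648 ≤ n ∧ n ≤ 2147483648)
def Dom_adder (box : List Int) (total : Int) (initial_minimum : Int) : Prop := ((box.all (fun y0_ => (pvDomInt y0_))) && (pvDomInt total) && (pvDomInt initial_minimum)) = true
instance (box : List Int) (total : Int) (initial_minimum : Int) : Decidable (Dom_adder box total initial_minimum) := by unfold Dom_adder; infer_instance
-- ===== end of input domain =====

-- B replaces A's O(n^2) min/index/slice recursion by one O(n) pass over strict
-- prefix-minimum records (objective: faster, asymptotic).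

-- ===== PORT A =====
-- literal transliteration of A: min(box) = PySem.List.min?, box.index = PySem.List.index?,
-- box[:pos] = PySem.List.slice; 'none' branches are Python's ValueError (outside Pre_).
def adder (box : List Int) (total : Int) (initial_minimum : Int) : Int :=
  if box.length = 1 then
    total + PySem.List.pyGetD box 0 0 - initial_minimum
  else
    match _hm : PySem.List.min? box (fun x => x) with
    | none => 0      -- min([]) raises ValueError: outside Pre_
    | some smallest =>
      match hp : PySem.List.index? box smallest with
      | none => 0    -- unreachable: the minimum is in the list
      | some pos =>
        adder (PySem.List.slice box none (some (pos : Int)))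
          (total + smallest * box.length) initial_minimum
termination_by box.length
decreasing_by
  obtain ⟨hk, -, -⟩ := PySem.List.getElem_of_index?_eq_some hp
  simp [PySem.List.slice_to_natCast]
  omega

-- ===== PORT B =====
-- the body of Source B's for-loop (acc, prev, cur_min) as a fold step
def bstep (box : List Int) (st : Int × Int × Int) (i : Int) : Int × Int × Int :=
  if PySem.List.pyGetD box i 0 < st.2.2 then
    (if st.2.1 ≥ 1 then st.1 + PySem.List.pyGetD box st.2.1 0 * i else st.1,
     i, PySem.List.pyGetD box i 0)
  else st

def adder_alt (box : List Int) (total : Int) (initial_minimum : Int) : Int :=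
  let st := (PySem.List.pyRange 1 box.length 1).foldl (bstep box)
      (total + PySem.List.pyGetD box 0 0 - initial_minimum, 0, PySem.List.pyGetD box 0 0)
  if st.2.1 ≥ 1 then st.1 + PySem.List.pyGetD box st.2.1 0 * box.length else st.1

-- ===== PRECONDITION & SPEC =====
-- Pre_: exactly the inputs on which A returns: a singleton, or length ≥ 2 with
-- box[1] < box[0]; on every other input A's recursion reaches min([]) (or box is [])
-- and raises (ValueError / IndexError).
def Pre_adder (box : List Int) (total : Int) (initial_minimum : Int) : Prop :=
  box.length = 1 ∨ (2 ≤ box.length ∧ box.getD 1 0 < box.getD 0 0)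

instance (box : List Int) (total : Int) (initial_minimum : Int) : Decidable (Pre_adder box total initial_minimum) := by unfold Pre_adder; infer_instance

def pvWitness_adder : List Int × Int × Int := ([5, 3, 4, 2], 0, 0)

def Spec_adder (box : List Int) (total : Int) (initial_minimum : Int) (out : Int) : Prop := out = adder_alt box total initial_minimum
instance (box : List Int) (total : Int) (initial_minimum : Int) (out : Int) : Decidable (Spec_adder box total initial_minimum out) := by unfold Spec_adder; infer_instance

-- ===== CLAIM (what is proved, stated in full; the proofs are below) =====
def Claim_equal_adder : Prop := ∀ (box : List Int) (total : Int) (initial_minimum : Int), Dom_adder box total initial_minimum → Pre_adder box total initial_minimum → Spec_adder box total initial_minimum (adder box total initial_minimum)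


-- ===== LEMMAS AND PROOFS =====

-- Source B's loop as a step-indexed state sequence: Gfun box init m is the state after
-- processing indices 1..m.
def Gfun (box : List Int) (init : Int × Int × Int) : Nat → Int × Int × Int
  | 0 => init
  | k + 1 => bstep box (Gfun box init k) (1 + (k : Int))

lemma foldl_range_eq_Gfun (box : List Int) (m : Nat) (init : Int × Int × Int) :
    (List.foldl (bstep box) init ((List.range m).map (fun (k : Nat) => (1 : Int) + (k : Int)))) = Gfun box init m := by
  induction m with
  | zero => simp [Gfun]
  | succ k ih =>
    rw [List.range_succ, List.map_append, List.foldl_append, ih]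
    rfl

lemma adder_alt_eq_Gfun (box : List Int) (total im : Int) (hlen : 1 ≤ box.length) :
    adder_alt box total im =
      (let st := Gfun box (total + box.getD 0 0 - im, 0, box.getD 0 0) (box.length - 1)
       if st.2.1 ≥ 1 then st.1 + PySem.List.pyGetD box st.2.1 0 * box.length else st.1) := by
  have h1 := PySem.List.pyRange_one 1 ((box.length : Int))
  have h2 : (((box.length : Int) - 1).toNat) = box.length - 1 := by omega
  simp only [adder_alt, h1, h2, foldl_range_eq_Gfun, PySem.List.pyGetD_zero]

lemma getD_take_eq (box : List Int) (pos j : Nat) (hj : j < pos) (hl : pos ≤ box.length) :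
    (box.take pos).getD j 0 = box.getD j 0 := by
  have hj2 : j < box.length := lt_of_lt_of_le hj hl
  have hj3 : j < (box.take pos).length := by simp [List.length_take]; omega
  rw [List.getD_eq_getElem _ _ hj3, List.getD_eq_getElem _ _ hj2, List.getElem_take]

-- invariant: after processing 1..m, prev is some p ≤ m, cur_min = box[p], and
-- cur_min ≤ box[j] for all j ≤ m
lemma Ginv (box : List Int) (a : Int) (m : Nat) :
    ∃ p : Nat, (Gfun box (a, 0, box.getD 0 0) m).2.1 = (p : Int) ∧ p ≤ m ∧
      (Gfun box (a, 0, box.getD 0 0) m).2.2 = box.getD p 0 ∧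
      ∀ j : Nat, j ≤ m → (Gfun box (a, 0, box.getD 0 0) m).2.2 ≤ box.getD j 0 := by
  induction m with
  | zero =>
    refine ⟨0, rfl, Nat.le_refl 0, rfl, ?_⟩
    intro j hj
    have : j = 0 := by omega
    subst this
    exact le_refl _
  | succ k ih =>
    obtain ⟨p, hp1, hp2, hp3, hp4⟩ := ih
    have hcast : (1 : Int) + (k : Int) = ((k + 1 : Nat) : Int) := by push_cast; ring
    have hget : PySem.List.pyGetD box (1 + (k : Int)) 0 = box.getD (k + 1) 0 := by
      rw [hcast, PySem.List.pyGetD_natCast]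
    have hstep : Gfun box (a, 0, box.getD 0 0) (k + 1)
        = bstep box (Gfun box (a, 0, box.getD 0 0) k) (1 + (k : Int)) := rfl
    by_cases hcond : box.getD (k + 1) 0 < (Gfun box (a, 0, box.getD 0 0) k).2.2
    · have h2 : Gfun box (a, 0, box.getD 0 0) (k + 1)
          = ((if (Gfun box (a, 0, box.getD 0 0) k).2.1 ≥ 1 then
                (Gfun box (a, 0, box.getD 0 0) k).1
                  + PySem.List.pyGetD box (Gfun box (a, 0, box.getD 0 0) k).2.1 0 * (1 + (k : Int))
              else (Gfun box (a, 0, box.getD 0 0) k).1),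
             1 + (k : Int), box.getD (k + 1) 0) := by
        rw [hstep]; unfold bstep; rw [hget, if_pos hcond]
      refine ⟨k + 1, by rw [h2, hcast], Nat.le_refl _, by rw [h2], ?_⟩
      intro j hj
      rw [h2]
      rcases Nat.lt_or_ge j (k + 1) with hlt | hge
      · have := hp4 j (by omega)
        simp only
        omega
      · have : j = k + 1 := by omega
        subst this
        exact le_refl _
    · have h2 : Gfun box (a, 0, box.getD 0 0) (k + 1) = Gfun box (a, 0, box.getD 0 0) k := by
        rw [hstep]; unfold bstep; rw [hget, if_neg hcond]
      refine ⟨p, by rw [h2, hp1], by omega, by rw [h2, hp3], ?_⟩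
      intro j hj
      rw [h2]
      rcases Nat.lt_or_ge j (k + 1) with hlt | hge
      · exact hp4 j (by omega)
      · have : j = k + 1 := by omega
        subst this
        omega

lemma bstep_add (box : List Int) (st : Int × Int × Int) (c i : Int) :
    bstep box (st.1 + c, st.2.1, st.2.2) i
      = ((bstep box st i).1 + c, (bstep box st i).2.1, (bstep box st i).2.2) := by
  unfold bstep
  split_ifs with h1 h2 <;> simp_all <;> ring

lemma Gadd (box : List Int) (a p mm c : Int) (m : Nat) :
    Gfun box (a + c, p, mm) m
      = ((Gfun box (a, p, mm) m).1 + c, (Gfun box (a, p, mm) m).2.1,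
         (Gfun box (a, p, mm) m).2.2) := by
  induction m with
  | zero => simp [Gfun]
  | succ k ih =>
    show bstep box (Gfun box (a + c, p, mm) k) _ = _
    rw [ih]
    exact bstep_add box (Gfun box (a, p, mm) k) c _

-- on indices < pos, the loop over box.take pos runs through the same states
lemma Gtake (box : List Int) (pos : Nat) (hpos : 1 ≤ pos) (hl : pos ≤ box.length)
    (a : Int) : ∀ m : Nat, m < pos →
    Gfun (box.take pos) (a, 0, (box.take pos).getD 0 0) m
      = Gfun box (a, 0, box.getD 0 0) m := by
  have h0 : (box.take pos).getD 0 0 = box.getD 0 0 := getD_take_eq box pos 0 hpos hl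
  intro m
  induction m with
  | zero =>
    intro _
    show (a, 0, (box.take pos).getD 0 0) = (a, 0, box.getD 0 0)
    rw [h0]
  | succ k ih =>
    intro hk
    obtain ⟨p, hp1, hp2, hp3, -⟩ := Ginv box a k
    have hcast : (1 : Int) + (k : Int) = ((k + 1 : Nat) : Int) := by push_cast; ring
    show bstep (box.take pos) (Gfun (box.take pos) (a, 0, (box.take pos).getD 0 0) k) _ = bstep box _ _
    rw [ih (by omega)]
    unfold bstep
    rw [hcast, PySem.List.pyGetD_natCast, PySem.List.pyGetD_natCast,
        getD_take_eq box pos (k + 1) (by omega) hl, hp1, PySem.List.pyGetD_natCast,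
        PySem.List.pyGetD_natCast, getD_take_eq box pos p (by omega) hl]

-- once cur_min is the global minimum, later iterations leave the state unchanged
lemma Gconst (box : List Int) (init : Int × Int × Int) (pos : Nat) (smallest : Int)
    (hmin : ∀ y ∈ box, smallest ≤ y)
    (hstate : (Gfun box init pos).2.2 = smallest) :
    ∀ m : Nat, pos ≤ m → m < box.length → Gfun box init m = Gfun box init pos := by
  intro m
  induction m with
  | zero =>
    intro h _
    have hz : pos = 0 := by omega
    subst hz
    rfl
  | succ k ih =>
    intro h1 h2
    rcases Nat.lt_or_ge pos (k + 1) with hlt | hge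
    · have hik := ih (by omega) (by omega)
      show bstep box (Gfun box init k) _ = _
      rw [hik]
      have hcast : (1 : Int) + (k : Int) = ((k + 1 : Nat) : Int) := by push_cast; ring
      have hmem : box.getD (k + 1) 0 ∈ box := by
        rw [List.getD_eq_getElem _ _ h2]; exact List.getElem_mem h2
      have : ¬ (PySem.List.pyGetD box (1 + (k : Int)) 0 < (Gfun box init pos).2.2) := by
        rw [hcast, PySem.List.pyGetD_natCast, hstate]
        exact not_lt.mpr (hmin _ hmem)
      unfold bstep
      rw [if_neg this]
    · have : pos = k + 1 := by omega
      rw [this]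

-- the key step: B on box equals B on the prefix before the first minimum, with the
-- minimum times the length added to total (exactly A's recursive step)
lemma step_eq (box : List Int) (total im smallest : Int) (pos : Nat)
    (hn : 2 ≤ box.length) (hmin : ∀ y ∈ box, smallest ≤ y)
    (hposlt : pos < box.length) (hget : box.getD pos 0 = smallest)
    (hfirst : ∀ j : Nat, j < pos → smallest < box.getD j 0)
    (hpos1 : 1 ≤ pos) :
    adder_alt box total im
      = adder_alt (box.take pos) (total + smallest * box.length) im := by
  obtain ⟨q, rfl⟩ : ∃ q, pos = q + 1 := ⟨pos - 1, by omega⟩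
  -- state before index pos
  obtain ⟨p, hp1, hp2, hp3, -⟩ := Ginv box (total + box.getD 0 0 - im) q
  set a := total + box.getD 0 0 - im with ha
  set stq := Gfun box (a, 0, box.getD 0 0) q with hstq
  -- the step at index pos fires
  have hcast : (1 : Int) + (q : Int) = ((q + 1 : Nat) : Int) := by push_cast; ring
  have hfire : PySem.List.pyGetD box (1 + (q : Int)) 0 < stq.2.2 := by
    rw [hcast, PySem.List.pyGetD_natCast, hget, hp3]
    exact hfirst p (by omega)
  have hGpos : Gfun box (a, 0, box.getD 0 0) (q + 1)
      = ((if stq.2.1 ≥ 1 then stq.1 + PySem.List.pyGetD box stq.2.1 0 * (1 + (q : Int)) else stq.1),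
         1 + (q : Int), PySem.List.pyGetD box (1 + (q : Int)) 0) := by
    show bstep box stq (1 + (q : Int)) = _
    unfold bstep
    rw [if_pos hfire]
  have hGsm : (Gfun box (a, 0, box.getD 0 0) (q + 1)).2.2 = smallest := by
    rw [hGpos]; simp only
    rw [hcast, PySem.List.pyGetD_natCast, hget]
  -- the state is constant from pos to the end
  have hconst := Gconst box (a, 0, box.getD 0 0) (q + 1) smallest hmin hGsm
      (box.length - 1) (by omega) (by omega)
  -- left side
  have hA := adder_alt_eq_Gfun box total im (by omega)
  rw [hA, ← ha]
  simp only [hconst, hGpos]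
  have hprev1 : (1 : Int) + (q : Int) ≥ 1 := by omega
  rw [if_pos hprev1]
  rw [hcast, PySem.List.pyGetD_natCast, hget]
  -- right side
  have hlt : (box.take (q + 1)).length = q + 1 := by simp [List.length_take]; omega
  have hB := adder_alt_eq_Gfun (box.take (q + 1)) (total + smallest * box.length) im
      (by omega)
  rw [hB]
  simp only [hlt]
  have h0take : (box.take (q + 1)).getD 0 0 = box.getD 0 0 :=
    getD_take_eq box (q + 1) 0 (by omega) (by omega)
  have hshift : total + smallest * (box.length : Int) + (box.take (q + 1)).getD 0 0 - im
      = a + smallest * (box.length : Int) := by rw [h0take, ha]; ring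
  rw [hshift, Gadd]
  simp only [Nat.add_sub_cancel]
  rw [Gtake box (q + 1) (by omega) (by omega) a q (by omega)]
  rw [← hstq, hp1, PySem.List.pyGetD_natCast, PySem.List.pyGetD_natCast,
      getD_take_eq box (q + 1) p (by omega) (by omega)]
  -- both sides as case on p ≥ 1
  by_cases hpc : ((p : Nat) : Int) ≥ 1
  · rw [if_pos hpc, if_pos hpc]
    ring
  · rw [if_neg hpc, if_neg hpc]

lemma main_eq : ∀ (n : Nat) (box : List Int), box.length ≤ n →
    ∀ (total im : Int), Pre_adder box total im → adder box total im = adder_alt box total im := by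
  intro n
  induction n with
  | zero =>
    intro box hlen total im hpre
    rcases hpre with h | ⟨h, -⟩ <;> omega
  | succ n ih =>
    intro box hlen total im hpre
    rcases hpre with h1 | ⟨h2, hlt⟩
    · -- singleton: both return total + box[0] - im
      rw [adder, if_pos h1]
      have : PySem.List.pyRange 1 (box.length) 1 = [] := by
        rw [h1]; exact PySem.List.pyRange_one_eq_nil (by norm_num)
      simp [adder_alt, this, PySem.List.pyGetD_zero]
    · -- length ≥ 2
      have hne : box ≠ [] := by intro h; subst h; simp at h2
      rw [adder, if_neg (by omega)]
      split
      next hm => exact absurd ((PySem.List.min?_eq_none_iff box (fun x => x)).mp hm) hne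
      next smallest hm =>
      have hmem : smallest ∈ box := PySem.List.min?_mem hm
      have hmin : ∀ y ∈ box, smallest ≤ y := by
        intro y hy
        simpa using PySem.List.min?_isMin hm y hy
      split
      next hpi => exact absurd ((PySem.List.index?_eq_none_iff box smallest).mp hpi) (by simp [hmem])
      next pos hpi =>
      obtain ⟨hk, hgetE, hneq⟩ := PySem.List.getElem_of_index?_eq_some hpi
      have hget : box.getD pos 0 = smallest := by
        rw [List.getD_eq_getElem _ _ hk]; exact hgetE
      have hfirst : ∀ j : Nat, j < pos → smallest < box.getD j 0 := by
        intro j hj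
        have hjl : j < box.length := by omega
        rw [List.getD_eq_getElem _ _ hjl]
        exact lt_of_le_of_ne (hmin _ (List.getElem_mem hjl)) (Ne.symm (hneq j hj))
      have h0 : box.getD 0 0 = box[0] := List.getD_eq_getElem _ _ (by omega)
      have h1g : box.getD 1 0 = box[1] := List.getD_eq_getElem _ _ (by omega)
      have hpos1 : 1 ≤ pos := by
        by_contra hc
        have : pos = 0 := by omega
        subst this
        have : smallest ≤ box.getD 1 0 := by
          rw [h1g]; exact hmin _ (List.getElem_mem (by omega))
        omega
      have hslice : PySem.List.slice box none (some ((pos : Nat) : Int)) = box.take pos :=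
        PySem.List.slice_to_natCast box pos
      rw [hslice]
      have hpre' : Pre_adder (box.take pos) (total + smallest * box.length) im := by
        rcases Nat.lt_or_ge pos 2 with hp2 | hp2
        · left; simp [List.length_take]; omega
        · right
          constructor
          · simp [List.length_take]; omega
          · rw [getD_take_eq box pos 1 (by omega) (by omega),
                getD_take_eq box pos 0 (by omega) (by omega)]
            exact hlt
      have hlen' : (box.take pos).length ≤ n := by simp [List.length_take]; omega
      rw [ih (box.take pos) hlen' _ im hpre']
      exact (step_eq box total im smallest pos h2 hmin hk hget hfirst hpos1).symm

-- ===== VERDICT (by name: the statement is the Claim_ definition above) =====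
theorem adder_spec : Claim_equal_adder := by
  intro box total im _ hpre
  unfold Spec_adder
  exact main_eq box.length box (Nat.le_refl _) total im hpre
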